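-- pv_equiv track=rewrite | github.com/verabaranova2000/RED | refinement/param_utils.py | expand_intensity_params
-- ===== SOURCE A (Python) =====
-- def is_intensity_param(name: str) -> bool:
--     """
--     Проверить, является ли параметр параметром интенсивности.
--     Шаблон:
--       Phase1_I_1_1_1
--       Phase1_I_2_0_0
--     """
--     return "_I_" in name
--
-- def extract_intensity_params(pars, prefix=None):
--     """
--     Извлечение параметров из набора: какие параметры интенсивностей есть в наборе?
--     Возвращает список параметров интенсивностей I_hkl из lmfit.Parameters.
--
--     Parameters
--     ----------
--     pars : lmfit.Parameters
--         Набор параметров модели.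
--
--     prefix : str, optional
--         Префикс фазы (например 'Phase1_').
--         Если указан — выбираются только интенсивности этой фазы.
--
--     Returns
--     -------
--     list[str]
--         Список имён параметров интенсивностей.
--     """
--     names = []
--     for name in pars.keys():
--         if is_intensity_param(name):
--             if prefix is None or name.startswith(prefix):
--                 names.append(name)
--     return names
--
-- def expand_intensity_params(params_list, pars):
--     """
--     Разворачивание YAML-маркеров.
--     Заменяет маркеры типа 'Phase1_I_inside' на реальные параметры интенсивностей.
--     """
--     expanded = []
--     for p in params_list:
--         if p.endswith("_I_inside"):
--             prefix = p.replace("I_inside", "")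
--             expanded.extend(extract_intensity_params(pars, prefix))
--         else:
--             expanded.append(p)
--     return expanded
-- ===== SOURCE B (Python) =====
-- def expand_intensity_params(params_list, pars):
--     # Inverted loop order: one shared pass over pars routes each intensity name
--     # into the bucket of every marker it matches; buckets are then spliced back.
--     buckets = [[p.replace("I_inside", ""), []]
--                for p in params_list if p.endswith("_I_inside")]
--     for name in pars.keys():
--         if "_I_" in name:
--             for b in buckets:
--                 if name.startswith(b[0]):
--                     b[1].append(name)
--     out = []
--     it = iter(buckets)
--     for p in params_list:
--         if p.endswith("_I_inside"):
--             out.extend(next(it)[1])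
--         else:
--             out.append(p)
--     return out
-- ===== Notes on version B (the rewrite author's own statement) =====
-- stated objective: alternative
-- what changed: B inverts the loop nesting: a single shared pass over pars routes each intensity name into per-marker buckets (built from the markers' prefixes), and the output is assembled by splicing buckets back into params_list, instead of A's per-marker rescan of pars.
import Mathlib
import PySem

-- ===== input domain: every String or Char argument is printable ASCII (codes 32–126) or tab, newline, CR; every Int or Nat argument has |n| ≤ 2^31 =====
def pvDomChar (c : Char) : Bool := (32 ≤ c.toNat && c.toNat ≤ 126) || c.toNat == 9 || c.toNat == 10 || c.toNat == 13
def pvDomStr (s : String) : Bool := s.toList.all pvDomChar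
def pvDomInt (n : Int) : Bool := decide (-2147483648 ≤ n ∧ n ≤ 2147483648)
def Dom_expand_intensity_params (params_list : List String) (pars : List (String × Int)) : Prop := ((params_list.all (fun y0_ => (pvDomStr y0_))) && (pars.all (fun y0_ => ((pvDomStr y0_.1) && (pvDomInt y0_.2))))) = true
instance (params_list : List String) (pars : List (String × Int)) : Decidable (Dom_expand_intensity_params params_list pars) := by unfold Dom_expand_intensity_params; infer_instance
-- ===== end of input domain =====

-- B inverts the loop nesting: one shared pass over pars routes every intensity name into
-- per-marker buckets, which are spliced back into params_list; return values proved identical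
-- (alternative decomposition, same cost class).

-- ===== PORT A =====
def is_intensity_param (name : String) : Bool := PySem.Str.isIn "_I_" name

-- 'prefix is None or name.startswith(prefix)'
def pfx_ok (pfx : Option String) (name : String) : Bool :=
  match pfx with
  | none => true
  | some p => PySem.Str.startswith name p

def extract_intensity_params (pars : List (String × Int)) (pfx : Option String) : List String :=
  pars.foldl (fun names kv =>
    if is_intensity_param kv.1 then
      if pfx_ok pfx kv.1 then
        names ++ [kv.1]
      else names
    else names) []

def expand_intensity_params (params_list : List String) (pars : List (String × Int)) : List String :=
  params_list.foldl (fun expanded p =>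
    if PySem.Str.endswith p "_I_inside" then
      expanded ++ extract_intensity_params pars (some (PySem.Str.replace p "I_inside" ""))
    else
      expanded ++ [p]) []

-- ===== PORT B =====
-- 'for b in buckets: if name.startswith(b[0]): b[1].append(name)'
def route_name (name : String) (buckets : List (String × List String)) : List (String × List String) :=
  buckets.map (fun b => if PySem.Str.startswith name b.1 then (b.1, b.2 ++ [name]) else b)

-- final splice: walk params_list consuming one bucket per marker ('next(it)')
def splice_buckets : List String → List (String × List String) → List String
  | [], _ => []
  | p :: rest, buckets =>
    if PySem.Str.endswith p "_I_inside" then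
      match buckets with
      | b :: bs => b.2 ++ splice_buckets rest bs
      | [] => []   -- unreachable: one bucket exists per marker
    else
      p :: splice_buckets rest buckets

def expand_intensity_params_alt (params_list : List String) (pars : List (String × Int)) : List String :=
  let buckets0 := (params_list.filter (fun p => PySem.Str.endswith p "_I_inside")).map
      (fun p => (PySem.Str.replace p "I_inside" "", ([] : List String)))
  let buckets := pars.foldl (fun bs kv =>
      if PySem.Str.isIn "_I_" kv.1 then route_name kv.1 bs else bs) buckets0
  splice_buckets params_list buckets

-- ===== PRECONDITION & SPEC =====
def Spec_expand_intensity_params (params_list : List String) (pars : List (String × Int)) (out : List String) : Prop := out = expand_intensity_params_alt params_list pars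
instance (params_list : List String) (pars : List (String × Int)) (out : List String) : Decidable (Spec_expand_intensity_params params_list pars out) := by unfold Spec_expand_intensity_params; infer_instance

-- ===== CLAIM (what is proved, stated in full; the proofs are below) =====
def Claim_equal_expand_intensity_params : Prop := ∀ (params_list : List String) (pars : List (String × Int)), Dom_expand_intensity_params params_list pars → Spec_expand_intensity_params params_list pars (expand_intensity_params params_list pars)

-- ===== LEMMAS AND PROOFS =====

-- the names that end up in the bucket with prefix `pre`, in pars order
def pvMatches (pars : List (String × Int)) (pre : String) : List String :=
  (pars.map Prod.fst).filter (fun n => PySem.Str.isIn "_I_" n && PySem.Str.startswith n pre)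

-- A's per-marker scan computes exactly `pvMatches`
set_option maxHeartbeats 1600000 in
theorem extract_eq_pvMatches (pars : List (String × Int)) (pre : String) :
    extract_intensity_params pars (some pre) = pvMatches pars pre := by
  unfold extract_intensity_params pvMatches is_intensity_param pfx_ok
  have h : ∀ (names : List String) (kv : String × Int), kv ∈ pars →
      (if PySem.Str.isIn "_I_" kv.1 then
        if PySem.Str.startswith kv.1 pre then names ++ [kv.1] else names
       else names)
      = (if (PySem.Str.isIn "_I_" kv.1 && PySem.Str.startswith kv.1 pre) then
          names ++ [kv.1] else names) := by
    intro names kv _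
    rcases Bool.eq_false_or_eq_true (PySem.Str.isIn "_I_" kv.1) with h1 | h1 <;>
      rcases Bool.eq_false_or_eq_true (PySem.Str.startswith kv.1 pre) with h2 | h2 <;>
      simp only [h1, h2] <;> simp
  refine Eq.trans (PySem.List.foldl_congr_mem pars _
        (fun names kv =>
          if (PySem.Str.isIn "_I_" kv.1 && PySem.Str.startswith kv.1 pre) then
            names ++ [kv.1] else names) [] h) ?_
  refine Eq.trans (PySem.List.foldl_append_if
        (fun kv => PySem.Str.isIn "_I_" kv.1 && PySem.Str.startswith kv.1 pre)
        Prod.fst pars []) ?_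
  simp [List.filter_map, Function.comp_def]

-- B's shared pass fills every bucket with exactly `pvMatches` of its prefix
theorem pvMatches_cons (kv : String × Int) (rest : List (String × Int)) (pre : String) :
    pvMatches (kv :: rest) pre =
      (if PySem.Str.isIn "_I_" kv.1 && PySem.Str.startswith kv.1 pre then [kv.1] else [])
        ++ pvMatches rest pre := by
  simp only [pvMatches, List.map_cons, List.filter_cons]
  cases hc : (PySem.Str.isIn "_I_" kv.1 && PySem.Str.startswith kv.1 pre) <;>
    simp only [Bool.false_eq_true, if_false, if_true, List.nil_append,
      List.singleton_append]

theorem fold_route_eq (pars : List (String × Int)) (bs : List (String × List String)) :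
    pars.foldl (fun bs kv =>
        if PySem.Str.isIn "_I_" kv.1 then route_name kv.1 bs else bs) bs
      = bs.map (fun b => (b.1, b.2 ++ pvMatches pars b.1)) := by
  induction pars generalizing bs with
  | nil => simp [pvMatches]
  | cons kv rest ih =>
    simp only [List.foldl_cons]
    cases h1 : PySem.Str.isIn "_I_" kv.1 with
    | false =>
      rw [if_neg (by simp), ih]
      apply List.map_congr_left
      intro b _
      rw [pvMatches_cons]
      simp only [h1, Bool.false_and, Bool.false_eq_true, if_false, List.nil_append]
    | true =>
      rw [if_pos rfl, ih, route_name, List.map_map]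
      apply List.map_congr_left
      intro b _
      rw [pvMatches_cons]
      simp only [h1, Bool.true_and, Function.comp_def]
      cases h2 : PySem.Str.startswith kv.1 b.1 with
      | false =>
        simp only [Bool.false_eq_true, if_false, List.nil_append]
      | true =>
        simp only [if_true, List.append_assoc, List.singleton_append]

-- splicing the filled buckets back equals the direct flatMap over params_list
theorem splice_eq_flatMap (g : String → List String) (pl : List String) :
    splice_buckets pl
        ((pl.filter (fun p => PySem.Str.endswith p "_I_inside")).map
          (fun p => (PySem.Str.replace p "I_inside" "", g (PySem.Str.replace p "I_inside" ""))))
      = pl.flatMap (fun p =>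
          if PySem.Str.endswith p "_I_inside" then g (PySem.Str.replace p "I_inside" "")
          else [p]) := by
  induction pl with
  | nil => simp [splice_buckets]
  | cons p rest ih =>
    cases h : PySem.Str.endswith p "_I_inside" with
    | false =>
      simp only [List.flatMap_cons, List.filter_cons, h, Bool.false_eq_true, if_false,
        splice_buckets, ih, List.singleton_append]
    | true =>
      simp only [List.flatMap_cons, List.filter_cons, h, if_true, List.map_cons,
        splice_buckets, ih]

-- ===== VERDICT (by name: the statement is the Claim_ definition above) =====
theorem expand_intensity_params_spec : Claim_equal_expand_intensity_params := by
  intro params_list pars _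
  unfold Spec_expand_intensity_params expand_intensity_params expand_intensity_params_alt
  have hA : (fun (expanded : List String) (p : String) =>
        if PySem.Str.endswith p "_I_inside" then
          expanded ++ extract_intensity_params pars (some (PySem.Str.replace p "I_inside" ""))
        else expanded ++ [p])
      = fun (expanded : List String) (p : String) =>
          expanded ++ (if PySem.Str.endswith p "_I_inside" then
            extract_intensity_params pars (some (PySem.Str.replace p "I_inside" "")) else [p]) := by
    funext acc p; split <;> rfl
  rw [hA, PySem.List.foldl_append_eq_flatMap]
  dsimp only
  rw [fold_route_eq]
  simp only [List.map_map, Function.comp_def, List.nil_append, List.nil_append]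
  rw [splice_eq_flatMap (pvMatches pars) params_list]
  apply List.flatMap_congr
  intro p _
  cases h : PySem.Str.endswith p "_I_inside" <;>
    simp only [Bool.false_eq_true, if_false, if_true, extract_eq_pvMatches]
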